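-- pv_equiv track=rewrite | github.com/pypi-data/pypi-mirror-206 | packages/zzlib/zzlib-0.1.1-py3-none-any.whl/zzlib/shell/slurm.py | _prep_lines
-- ===== SOURCE A (Python) =====
-- def _prep_lines(script: str):
--     lines = script.strip().split("\n")
--     exec_line = lines[0] if lines[0].startswith("#!") else None
--     arg_lines = []
--     cmd_lines = []
--     arg_flag = True
--     for l in lines[1 if exec_line else 0 :]:
--         if arg_flag and l.startswith(f"#SBATCH "):
--             arg_lines.append(l)
--         elif arg_flag or l.strip():
--             cmd_lines.append(l.rstrip())
--             arg_flag = False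
--     return exec_line, arg_lines, cmd_lines
-- ===== SOURCE B (Python) =====
-- def _prep_lines(script: str):
--     lines = script.strip().split("\n")
--     exec_line = lines[0] if lines[0].startswith("#!") else None
--     body = lines[1 if exec_line else 0:]
--     i = 0
--     while i < len(body) and body[i].startswith("#SBATCH "):
--         i += 1
--     arg_lines = body[:i]
--     rest = body[i:]
--     cmd_lines = [l.rstrip() for j, l in enumerate(rest) if j == 0 or l.strip()]
--     return exec_line, arg_lines, cmd_lines
-- ===== Notes on version B (the rewrite author's own statement) =====
-- stated objective: simpler
-- what changed: Replaces A's single stateful loop with an arg_flag by splitting the body at the end of its leading SBATCH-directive block (a span) and building cmd_lines with one comprehension that keeps the first trailing line unconditionally and drops blank lines after it.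
import Mathlib
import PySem

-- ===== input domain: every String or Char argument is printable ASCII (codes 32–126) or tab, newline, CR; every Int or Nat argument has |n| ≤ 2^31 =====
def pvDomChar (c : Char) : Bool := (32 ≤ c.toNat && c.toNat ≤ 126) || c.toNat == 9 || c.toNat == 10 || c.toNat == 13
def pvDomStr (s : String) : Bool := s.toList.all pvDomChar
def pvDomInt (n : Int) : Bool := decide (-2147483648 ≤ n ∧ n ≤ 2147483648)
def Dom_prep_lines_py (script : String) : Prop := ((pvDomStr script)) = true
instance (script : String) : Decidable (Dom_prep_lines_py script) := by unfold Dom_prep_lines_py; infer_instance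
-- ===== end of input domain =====

-- B replaces A's stateful flag loop by a split of the body into the leading
-- '#SBATCH ' block and the rest, plus one comprehension (simpler decomposition, same cost).

-- ===== PORT A =====
-- A's for-loop over the remaining lines, carrying (arg_flag, arg_lines, cmd_lines)
def prepA_loop : List String → Bool → List String → List String → List String × List String
  | [], _, args, cmds => (args, cmds)
  | l :: ls, flag, args, cmds =>
    if flag && PySem.Str.startswith l "#SBATCH " then
      prepA_loop ls flag (args ++ [l]) cmds
    else if flag || decide (PySem.Str.strip l ≠ "") then
      prepA_loop ls false args (cmds ++ [PySem.Str.rstrip l])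
    else
      prepA_loop ls flag args cmds

def prep_lines_py (script : String) : Option String × List String × List String :=
  let lines := (PySem.Str.split? (PySem.Str.strip script) "\n").getD [""]  -- sep "\n" ≠ "": split? is always some
  let l0 := lines.headD ""      -- lines[0]: str.split never returns an empty list
  let exec_line := if PySem.Str.startswith l0 "#!" then some l0 else none
  let body := PySem.List.slice lines (some (if exec_line.isSome then 1 else 0)) none
  let p := prepA_loop body true [] []
  (exec_line, p.1, p.2)

-- ===== PORT B =====
-- B's while loop: split body at the first line not starting with "#SBATCH "
def spanSbatch : List String → List String × List String
  | [] => ([], [])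
  | l :: ls =>
    if PySem.Str.startswith l "#SBATCH " then
      let p := spanSbatch ls
      (l :: p.1, p.2)
    else ([], l :: ls)

def prep_lines_py_alt (script : String) : Option String × List String × List String :=
  let lines := (PySem.Str.split? (PySem.Str.strip script) "\n").getD [""]  -- sep "\n" ≠ "": split? is always some
  let l0 := lines.headD ""
  let exec_line := if PySem.Str.startswith l0 "#!" then some l0 else none
  let body := PySem.List.slice lines (some (if exec_line.isSome then 1 else 0)) none
  let p := spanSbatch body
  let cmd_lines := (PySem.List.enumerate p.2 0).filterMap
    (fun q => if q.1 == 0 || decide (PySem.Str.strip q.2 ≠ "") then some (PySem.Str.rstrip q.2) else none)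
  (exec_line, p.1, cmd_lines)

-- ===== PRECONDITION & SPEC =====
def Spec_prep_lines_py (script : String) (out : Option String × List String × List String) : Prop := out = prep_lines_py_alt script
instance (script : String) (out : Option String × List String × List String) : Decidable (Spec_prep_lines_py script out) := by unfold Spec_prep_lines_py; infer_instance

-- ===== CLAIM (what is proved, stated in full; the proofs are below) =====
def Claim_equal_prep_lines_py : Prop := ∀ (script : String), Dom_prep_lines_py script → Spec_prep_lines_py script (prep_lines_py script)

-- ===== LEMMAS AND PROOFS =====

-- after arg_flag has dropped to False, A keeps exactly the non-blank lines, rstripped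
lemma prepA_loop_false (ls : List String) (args cmds : List String) :
    prepA_loop ls false args cmds =
      (args, cmds ++ (ls.filter (fun l => decide (PySem.Str.strip l ≠ ""))).map PySem.Str.rstrip) := by
  induction ls generalizing cmds with
  | nil => simp [prepA_loop]
  | cons l ls ih =>
    by_cases h : PySem.Str.strip l ≠ ""
    · simp [prepA_loop, h, ih]
    · simp [prepA_loop, h, ih]

-- the enumerate comprehension keeps element 0 unconditionally and filters the rest
lemma enum_filterMap (r : String) (rs : List String) :
    (PySem.List.enumerate (r :: rs) 0).filterMap
      (fun q => if q.1 == 0 || decide (PySem.Str.strip q.2 ≠ "") then some (PySem.Str.rstrip q.2) else none) =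
    PySem.Str.rstrip r :: (rs.filter (fun l => decide (PySem.Str.strip l ≠ ""))).map PySem.Str.rstrip := by
  have tail : ∀ (xs : List String) (s : Int), 1 ≤ s →
      (PySem.List.enumerate xs s).filterMap
        (fun q => if q.1 == 0 || decide (PySem.Str.strip q.2 ≠ "") then some (PySem.Str.rstrip q.2) else none) =
      (xs.filter (fun l => decide (PySem.Str.strip l ≠ ""))).map PySem.Str.rstrip := by
    intro xs
    induction xs with
    | nil => simp [PySem.List.enumerate_nil]
    | cons x xs ih =>
      intro s hs
      have hz : (s == 0) = false := by simp; omega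
      rw [PySem.List.enumerate_cons, List.filterMap_cons, ih (s + 1) (by omega)]
      by_cases h : PySem.Str.strip x = ""
      · simp [h, hz]
      · simp [h, hz]
  rw [PySem.List.enumerate_cons, List.filterMap_cons, tail rs (0 + 1) (by omega)]
  simp

-- with arg_flag still True, A's loop computes B's span-and-comprehension split
lemma prepA_loop_true (ls : List String) (args cmds : List String) :
    prepA_loop ls true args cmds =
      (args ++ (spanSbatch ls).1,
       cmds ++ (PySem.List.enumerate (spanSbatch ls).2 0).filterMap
        (fun q => if q.1 == 0 || decide (PySem.Str.strip q.2 ≠ "") then some (PySem.Str.rstrip q.2) else none)) := by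
  induction ls generalizing args with
  | nil => simp [prepA_loop, spanSbatch, PySem.List.enumerate_nil]
  | cons l ls ih =>
    by_cases h : PySem.Str.startswith l "#SBATCH " = true
    · simp only [prepA_loop, spanSbatch, h, Bool.true_and, if_true]
      rw [ih]
      simp
    · rw [Bool.not_eq_true] at h
      simp only [prepA_loop, spanSbatch, h, Bool.true_and, Bool.false_eq_true, if_false,
        Bool.true_or, if_true]
      rw [prepA_loop_false, enum_filterMap]
      simp

-- ===== VERDICT (by name: the statement is the Claim_ definition above) =====
theorem prep_lines_py_spec : Claim_equal_prep_lines_py := by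
  intro script _
  unfold Spec_prep_lines_py prep_lines_py prep_lines_py_alt
  simp only [prepA_loop_true]
  simp
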